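-- pv_equiv track=rewrite | github.com/kenta-takeuchi/proto_schedule_system | schedule/shift_service.py | get_max_shift_type
-- ===== SOURCE A (Python) =====
-- def get_max_shift_type(shift_schedule, shift_type=1):
--     def judge(shift_type):
--         if shift_type == 0:
--             return shift_type > 0
--         else:
--             return shift_type < 0
--
--     step = 1
--     tmp_list = [0 for _ in range(len(shift_schedule))]
--     for i, shift_type in enumerate(shift_schedule):
--         if judge(shift_type):
--             tmp_list[i] += step
--             step += 1
--         else:
--             step = 1
--     return max(tmp_list)
-- ===== SOURCE B (Python) =====
-- def get_max_shift_type(shift_schedule, shift_type=1):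
--     # segment into maximal consecutive runs, measure each run once
--     vals = []
--     i, n = 0, len(shift_schedule)
--     while i < n:
--         neg = shift_schedule[i] < 0
--         j = i
--         while j < n and (shift_schedule[j] < 0) == neg:
--             j += 1
--         vals.append(j - i if neg else 0)
--         i = j
--     return max(vals)
-- ===== Notes on version B (the rewrite author's own statement) =====
-- stated objective: alternative
-- what changed: B segments the schedule into maximal same-sign runs and takes the max of each negative run's length, instead of A's incremental per-element counter written into a preallocated zero list.
import Mathlib
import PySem

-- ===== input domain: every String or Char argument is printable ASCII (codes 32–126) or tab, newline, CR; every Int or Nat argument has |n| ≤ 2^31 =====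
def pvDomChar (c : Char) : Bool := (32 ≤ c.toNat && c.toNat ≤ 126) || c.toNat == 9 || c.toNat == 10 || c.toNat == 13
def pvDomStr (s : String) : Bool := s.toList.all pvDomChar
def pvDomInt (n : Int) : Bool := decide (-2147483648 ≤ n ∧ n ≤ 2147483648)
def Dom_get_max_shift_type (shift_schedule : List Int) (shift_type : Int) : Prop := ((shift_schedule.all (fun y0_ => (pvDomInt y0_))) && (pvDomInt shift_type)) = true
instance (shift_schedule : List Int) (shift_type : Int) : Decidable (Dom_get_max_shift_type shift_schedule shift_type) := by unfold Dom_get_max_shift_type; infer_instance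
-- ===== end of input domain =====

-- B measures maximal consecutive runs of negatives at once instead of A's per-element counter.
-- Both Pythons raise ValueError (max of empty list) on an empty schedule; Pre_ excludes that.

-- ===== PORT A =====
-- inner helper `judge`
def pvJudge (x : Int) : Bool := if x = 0 then decide (x > 0) else decide (x < 0)

-- the enumerate loop: builds tmp_list (zeros overwritten with the running step)
def pvALoop (l : List Int) (step : Int) : List Int :=
  match l with
  | [] => []
  | x :: xs => if pvJudge x then step :: pvALoop xs (step + 1) else 0 :: pvALoop xs 1

def get_max_shift_type (shift_schedule : List Int) (shift_type : Int) : Int :=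
  let tmp_list := pvALoop shift_schedule 1
  (PySem.List.max? tmp_list (fun y => y)).getD 0   -- max(tmp_list); none (empty) excluded by Pre_

-- ===== PORT B =====
-- split off the maximal run with the same sign-key as the head, record its length (0 for non-negative runs)
def pvBGroups (l : List Int) : List Int :=
  match l with
  | [] => []
  | x :: xs =>
    let k := decide (x < 0)
    let run := xs.takeWhile (fun y => decide (y < 0) == k)
    let rest := xs.dropWhile (fun y => decide (y < 0) == k)
    (if k then ((1 + run.length : Nat) : Int) else 0) :: pvBGroups rest
termination_by l.length
decreasing_by
  simp only [List.length_cons]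
  exact Nat.lt_succ_of_le (List.Sublist.length_le (List.dropWhile_sublist _))

def get_max_shift_type_alt (shift_schedule : List Int) (shift_type : Int) : Int :=
  (PySem.List.max? (pvBGroups shift_schedule) (fun y => y)).getD 0

-- ===== PRECONDITION & SPEC =====
-- Pre_ excludes only the empty schedule, on which both A and B raise ValueError (max of empty list)
def Pre_get_max_shift_type (shift_schedule : List Int) (shift_type : Int) : Prop :=
  shift_schedule ≠ []
instance (shift_schedule : List Int) (shift_type : Int) : Decidable (Pre_get_max_shift_type shift_schedule shift_type) := by unfold Pre_get_max_shift_type; infer_instance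

def pvWitness_get_max_shift_type : List Int × Int := ([-1, 2, -3, -4], 1)

def Spec_get_max_shift_type (shift_schedule : List Int) (shift_type : Int) (out : Int) : Prop := out = get_max_shift_type_alt shift_schedule shift_type
instance (shift_schedule : List Int) (shift_type : Int) (out : Int) : Decidable (Spec_get_max_shift_type shift_schedule shift_type out) := by unfold Spec_get_max_shift_type; infer_instance

-- ===== CLAIM (what is proved, stated in full; the proofs are below) =====
def Claim_equal_get_max_shift_type : Prop := ∀ (shift_schedule : List Int) (shift_type : Int), Dom_get_max_shift_type shift_schedule shift_type → Pre_get_max_shift_type shift_schedule shift_type → Spec_get_max_shift_type shift_schedule shift_type (get_max_shift_type shift_schedule shift_type)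

-- ===== LEMMAS AND PROOFS =====

-- max of a nonempty list, as the running-max loop (proof-side helper)
def pvLMax : List Int → Int
  | [] => 0
  | x :: t => t.foldl max x

theorem pvJudge_eq (x : Int) : pvJudge x = decide (x < 0) := by
  unfold pvJudge; by_cases h : x = 0 <;> simp [h]

theorem pvFoldl_max_init (l : List Int) (x y : Int) :
    l.foldl max (max x y) = max x (l.foldl max y) := by
  induction l generalizing y with
  | nil => simp
  | cons z t ih => simp only [List.foldl_cons, max_assoc, ih]

theorem pvLMax_append (a b : List Int) (ha : a ≠ []) (hb : b ≠ []) :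
    pvLMax (a ++ b) = max (pvLMax a) (pvLMax b) := by
  match a, b with
  | x :: t, y :: u =>
    simp only [pvLMax, List.cons_append, List.foldl_append, List.foldl_cons]
    exact pvFoldl_max_init u (t.foldl max x) y

theorem pvLMax_cons (x : Int) (t : List Int) (ht : t ≠ []) :
    pvLMax (x :: t) = max x (pvLMax t) := pvLMax_append [x] t (by simp) ht

-- the ascending segment written by A over a negative run
def pvSeg (s : Int) : Nat → List Int
  | 0 => []
  | m + 1 => s :: pvSeg (s + 1) m

theorem pvSeg_ne (s : Int) (m : Nat) : pvSeg s (m + 1) ≠ [] := by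
  simp [pvSeg]

theorem pvSeg_snoc (s : Int) (m : Nat) : pvSeg s (m + 1) = pvSeg s m ++ [s + m] := by
  induction m generalizing s with
  | zero => simp [pvSeg]
  | succ m ih =>
    show s :: pvSeg (s + 1) (m + 1) = (s :: pvSeg (s + 1) m) ++ [s + (m + 1)]
    rw [ih (s + 1)]
    simp only [List.cons_append]
    ring_nf

theorem pvLMax_seg (s : Int) (m : Nat) : pvLMax (pvSeg s (m + 1)) = s + m := by
  induction m with
  | zero => simp [pvSeg, pvLMax]
  | succ m ih =>
    rw [pvSeg_snoc, pvLMax_append _ _ (pvSeg_ne s m) (by simp), ih]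
    simp only [pvLMax, List.foldl_nil]
    push_cast
    omega

theorem pvLMax_replicate (m : Nat) : pvLMax (List.replicate (m + 1) (0 : Int)) = 0 := by
  induction m with
  | zero => simp [pvLMax]
  | succ m ih =>
    rw [List.replicate_succ, pvLMax_cons _ _ (by simp), ih]
    simp

-- A's loop over a run of negatives writes the ascending segment
theorem pvALoop_neg (run rest : List Int) (s : Int) (h : ∀ y ∈ run, y < 0) :
    pvALoop (run ++ rest) s = pvSeg s run.length ++ pvALoop rest (s + run.length) := by
  induction run generalizing s with
  | nil => simp [pvSeg]
  | cons x t ih =>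
    have hx : x < 0 := h x (by simp)
    simp only [List.cons_append, pvALoop, pvJudge_eq, decide_eq_true hx]
    rw [ih _ (fun y hy => h y (by simp [hy]))]
    simp only [List.length_cons, pvSeg, List.cons_append]
    norm_num
    ring_nf

-- A's loop over a run of non-negatives writes zeros and resets the step
theorem pvALoop_nonneg (run rest : List Int) (s : Int) (hne : run ≠ [])
    (h : ∀ y ∈ run, ¬ y < 0) :
    pvALoop (run ++ rest) s = List.replicate run.length 0 ++ pvALoop rest 1 := by
  induction run generalizing s with
  | nil => exact absurd rfl hne
  | cons x t ih =>
    have hx : ¬ x < 0 := h x (by simp)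
    simp only [List.cons_append, pvALoop, pvJudge_eq, decide_eq_false hx, Bool.false_eq_true,
      if_false, List.length_cons, List.replicate_succ]
    cases t with
    | nil => simp
    | cons z u =>
      rw [ih 1 (by simp) (fun y hy => h y (by simp [hy]))]

-- the step value entering a list whose head is non-negative is irrelevant
theorem pvALoop_reset (rest : List Int) (s : Int)
    (h : rest = [] ∨ ∃ z u, rest = z :: u ∧ ¬ z < 0) :
    pvALoop rest s = pvALoop rest 1 := by
  rcases h with h | ⟨z, u, rfl, hz⟩
  · simp [h, pvALoop]
  · simp [pvALoop, pvJudge_eq, decide_eq_false hz]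

theorem pvBGroups_ne (l : List Int) (h : l ≠ []) : pvBGroups l ≠ [] := by
  cases l with
  | nil => exact absurd rfl h
  | cons x xs => rw [pvBGroups]; simp

theorem pvALoop_ne (l : List Int) (h : l ≠ []) : pvALoop l 1 ≠ [] := by
  cases l with
  | nil => exact absurd rfl h
  | cons x xs => unfold pvALoop; split <;> simp

-- core: max of A's tmp_list = max of B's group values, on nonempty lists
theorem pv_core : ∀ (n : Nat) (l : List Int), l.length ≤ n → l ≠ [] →
    pvLMax (pvALoop l 1) = pvLMax (pvBGroups l) := by
  intro n
  induction n with
  | zero => intro l hl hne; cases l with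
    | nil => exact absurd rfl hne
    | cons x xs => simp at hl
  | succ n ih =>
    intro l hl hne
    cases l with
    | nil => exact absurd rfl hne
    | cons x xs =>
      set p : Int → Bool := fun y => decide (y < 0) == decide (x < 0) with hp
      have hsplit : xs = xs.takeWhile p ++ xs.dropWhile p := (List.takeWhile_append_dropWhile).symm
      set run := xs.takeWhile p with hrun
      set rest := xs.dropWhile p with hrest
      have hlen : rest.length ≤ n := by
        have h := List.Sublist.length_le (List.dropWhile_sublist (l := xs) (p := p))
        rw [← hrest] at h
        simp only [List.length_cons] at hl
        omega
      have hreset : rest = [] ∨ ∃ z u, rest = z :: u ∧ decide (z < 0) ≠ decide (x < 0) := by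
        cases hr : rest with
        | nil => exact Or.inl rfl
        | cons z u =>
          refine Or.inr ⟨z, u, rfl, ?_⟩
          have := List.head?_dropWhile_not p xs
          rw [← hrest, hr] at this
          simpa [hp] using this
      have hlshape : x :: xs = (x :: run) ++ rest := by
        simp [List.cons_append, ← hsplit]
      have hB : pvBGroups (x :: xs) =
          (if decide (x < 0) then ((1 + run.length : Nat) : Int) else 0) :: pvBGroups rest := by
        rw [pvBGroups]
      by_cases hx : x < 0
      · -- negative run
        have hallneg : ∀ y ∈ x :: run, y < 0 := by
          intro y hy
          rcases List.mem_cons.mp hy with rfl | hy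
          · exact hx
          · have := List.mem_takeWhile_imp hy
            simp [hp, decide_eq_true hx] at this
            exact this
        have hA : pvALoop (x :: xs) 1 =
            pvSeg 1 (run.length + 1) ++ pvALoop rest (1 + (run.length + 1)) := by
          rw [hlshape, pvALoop_neg _ _ _ hallneg]
          simp
        have hres : pvALoop rest (1 + (run.length + 1)) = pvALoop rest 1 := by
          apply pvALoop_reset
          rcases hreset with h | ⟨z, u, hzu, hz⟩
          · exact Or.inl h
          · exact Or.inr ⟨z, u, hzu, by simpa [decide_eq_true hx] using hz⟩
        rw [hA, hres, hB, if_pos (decide_eq_true hx)]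
        cases hr : rest with
        | nil =>
          simp only [pvALoop, pvBGroups, List.append_nil]
          rw [pvLMax_seg]
          simp [pvLMax]
        | cons z u =>
          have hrne : rest ≠ [] := by simp [hr]
          have h1 : pvALoop rest 1 ≠ [] := pvALoop_ne rest hrne
          have h2 : pvBGroups rest ≠ [] := pvBGroups_ne rest hrne
          rw [← hr] at *
          rw [pvLMax_append _ _ (pvSeg_ne 1 run.length) h1,
              pvLMax_cons _ _ h2, pvLMax_seg, ih rest hlen hrne]
          norm_cast
      · -- non-negative run
        have hallnn : ∀ y ∈ x :: run, ¬ y < 0 := by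
          intro y hy
          rcases List.mem_cons.mp hy with rfl | hy
          · exact hx
          · have := List.mem_takeWhile_imp hy
            simp [hp, decide_eq_false hx] at this
            omega
        have hA : pvALoop (x :: xs) 1 =
            List.replicate (run.length + 1) 0 ++ pvALoop rest 1 := by
          rw [hlshape, pvALoop_nonneg _ _ _ (by simp) hallnn]
          simp
        rw [hA, hB, if_neg (by simpa using hx)]
        cases hr : rest with
        | nil =>
          simp only [pvALoop, pvBGroups, List.append_nil]
          rw [pvLMax_replicate]
          simp [pvLMax]
        | cons z u =>
          have hrne : rest ≠ [] := by simp [hr]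
          have h1 : pvALoop rest 1 ≠ [] := pvALoop_ne rest hrne
          have h2 : pvBGroups rest ≠ [] := pvBGroups_ne rest hrne
          rw [← hr] at *
          rw [pvLMax_append _ _ (by simp) h1, pvLMax_cons _ _ h2,
              pvLMax_replicate, ih rest hlen hrne]

-- ===== VERDICT (by name: the statement is the Claim_ definition above) =====
theorem get_max_shift_type_spec : Claim_equal_get_max_shift_type := by
  intro l t _ hpre
  unfold Spec_get_max_shift_type get_max_shift_type get_max_shift_type_alt
  have h1 : pvALoop l 1 ≠ [] := by
    cases l with
    | nil => exact absurd rfl hpre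
    | cons x xs => unfold pvALoop; split <;> simp
  have h2 := pvBGroups_ne l hpre
  obtain ⟨a, ta, ha⟩ := List.exists_cons_of_ne_nil h1
  obtain ⟨b, tb, hb⟩ := List.exists_cons_of_ne_nil h2
  have := pv_core l.length l (le_refl _) hpre
  simp only [ha, hb, PySem.List.max?_id_cons, Option.getD_some] at this ⊢
  simpa [pvLMax, ha, hb] using this
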